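-- pv_equiv track=rewrite | github.com/murphp55/MBTAMap | red_line.py | ascii_preview
-- ===== SOURCE A (Python) =====
-- def ascii_preview(frame):
--     # Render a quick ASCII bar from pixel 0..max
--     max_i = max(frame.keys()) if frame else 0
--     s = []
--     for i in range(max_i + 1):
--         if i in frame:
--             r,g,b = frame[i]
--             s.append("●" if r>200 else "•" if sum((r,g,b))>20 else "·")
--         else:
--             s.append(" ")
--     return "".join(s)
-- ===== SOURCE B (Python) =====
-- def ascii_preview(frame):
--     # Scatter into a pre-allocated buffer instead of scanning the index range.
--     max_i = max(frame.keys()) if frame else 0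
--     buf = [" "] * (max_i + 1)
--     for i, (r, g, b) in frame.items():
--         if 0 <= i <= max_i:
--             buf[i] = "●" if r > 200 else "•" if r + g + b > 20 else "·"
--     return "".join(buf)
-- ===== Notes on version B (the rewrite author's own statement) =====
-- stated objective: faster
-- what changed: B scatters each pixel into a pre-allocated space buffer indexed by its key instead of A's gather loop over range(max_i+1) with a membership test and dict lookup at every index.
import Mathlib
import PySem

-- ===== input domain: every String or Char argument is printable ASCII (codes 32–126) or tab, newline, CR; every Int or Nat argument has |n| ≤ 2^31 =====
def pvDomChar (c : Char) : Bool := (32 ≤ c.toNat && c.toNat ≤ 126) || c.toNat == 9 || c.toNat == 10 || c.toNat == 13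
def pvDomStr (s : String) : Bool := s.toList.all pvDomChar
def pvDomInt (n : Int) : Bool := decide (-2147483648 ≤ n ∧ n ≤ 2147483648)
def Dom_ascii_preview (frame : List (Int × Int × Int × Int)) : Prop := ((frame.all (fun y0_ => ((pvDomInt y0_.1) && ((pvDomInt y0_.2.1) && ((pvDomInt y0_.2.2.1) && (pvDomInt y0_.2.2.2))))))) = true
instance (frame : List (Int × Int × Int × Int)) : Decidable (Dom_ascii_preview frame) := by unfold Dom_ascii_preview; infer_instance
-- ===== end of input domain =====

-- B scatters each pixel into a pre-allocated space buffer instead of A's gather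
-- loop over the index range with a membership test; equal return values proved
-- on dicts (association lists with distinct keys).

-- ===== PORT A =====
-- first-match association-list lookup = Python dict lookup under the task's convention
def pvLookup (frame : List (Int × Int × Int × Int)) (i : Int) : Option (Int × Int × Int) :=
  match frame with
  | [] => none
  | (k, v) :: t => if k = i then some v else pvLookup t i

def ascii_preview (frame : List (Int × Int × Int × Int)) : String :=
  -- max(frame.keys()) if frame else 0  (frame nonempty ⇒ max? = some, so getD 0 is exact)
  let max_i : Int := if frame = [] then 0 else (PySem.List.max? (frame.map (·.1)) (fun x => x)).getD 0
  let s : List String := (PySem.List.pyRange 0 (max_i + 1) 1).foldl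
    (fun acc i =>
      match pvLookup frame i with
      | some (r, g, b) => acc ++ [if r > 200 then "●" else if r + g + b > 20 then "•" else "·"]
      | none => acc ++ [" "]) []
  PySem.Str.join "" s

-- ===== PORT B =====
def pvPx (r g b : Int) : Char := if r > 200 then '●' else if r + g + b > 20 then '•' else '·'

def ascii_preview_alt (frame : List (Int × Int × Int × Int)) : String :=
  let max_i : Int := if frame = [] then 0 else (PySem.List.max? (frame.map (·.1)) (fun x => x)).getD 0
  let buf : List Char := List.replicate (max_i + 1).toNat ' '
  let buf := frame.foldl
    (fun b p => if 0 ≤ p.1 ∧ p.1 ≤ max_i then b.set p.1.toNat (pvPx p.2.1 p.2.2.1 p.2.2.2) else b) buf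
  String.ofList buf

-- ===== PRECONDITION & SPEC =====
-- Pre_ excludes association lists with duplicate keys: they represent no Python dict
-- (A's argument is a dict, whose keys are necessarily distinct).
def Pre_ascii_preview (frame : List (Int × Int × Int × Int)) : Prop :=
  (frame.map (·.1)).Nodup
instance (frame : List (Int × Int × Int × Int)) : Decidable (Pre_ascii_preview frame) := by
  unfold Pre_ascii_preview; infer_instance

def pvWitness_ascii_preview : (List (Int × Int × Int × Int)) := [(2, 250, 0, 0), (0, 1, 2, 3)]

def Spec_ascii_preview (frame : List (Int × Int × Int × Int)) (out : String) : Prop := out = ascii_preview_alt frame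
instance (frame : List (Int × Int × Int × Int)) (out : String) : Decidable (Spec_ascii_preview frame out) := by unfold Spec_ascii_preview; infer_instance

-- ===== CLAIM (what is proved, stated in full; the proofs are below) =====
def Claim_equal_ascii_preview : Prop := ∀ (frame : List (Int × Int × Int × Int)), Dom_ascii_preview frame → Pre_ascii_preview frame → Spec_ascii_preview frame (ascii_preview frame)

-- ===== LEMMAS AND PROOFS =====

-- A's append-singleton loop is a map
lemma pvA_loop (frame : List (Int × Int × Int × Int)) :
    ∀ (xs : List Int) (acc : List String),
      xs.foldl (fun acc i =>
        match pvLookup frame i with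
        | some (r, g, b) => acc ++ [if r > 200 then "●" else if r + g + b > 20 then "•" else "·"]
        | none => acc ++ [" "]) acc =
      acc ++ xs.map (fun i =>
        match pvLookup frame i with
        | some (r, g, b) => if r > 200 then "●" else if r + g + b > 20 then "•" else "·"
        | none => " ") := by
  intro xs
  induction xs with
  | nil => simp
  | cons x t ih =>
    intro acc
    simp only [List.foldl_cons, List.map_cons]
    cases h : pvLookup frame x with
    | none => simp [ih]
    | some v => obtain ⟨r, g, b⟩ := v; simp [ih]

lemma pvLookup_eq_none (frame : List (Int × Int × Int × Int)) (i : Int)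
    (h : i ∉ frame.map (·.1)) : pvLookup frame i = none := by
  induction frame with
  | nil => rfl
  | cons p t ih =>
    simp only [List.map_cons, List.mem_cons, not_or] at h
    have h1 : p.1 ≠ i := fun e => h.1 e.symm
    simp [pvLookup, h1, ih h.2]

-- scatter characterisation: each surviving cell is the (unique) matching pixel
lemma pv_scatter_get (m : Int) :
    ∀ (frame : List (Int × Int × Int × Int)) (buf : List Char),
      (frame.map (·.1)).Nodup →
      (∀ p ∈ frame, p.1 ≤ m) →
      ∀ j : Nat, j < buf.length →
        (frame.foldl
          (fun b p => if 0 ≤ p.1 ∧ p.1 ≤ m then b.set p.1.toNat (pvPx p.2.1 p.2.2.1 p.2.2.2) else b)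
          buf)[j]? =
        (match pvLookup frame (j : Int) with
         | some (r, g, b) => some (pvPx r g b)
         | none => buf[j]?) := by
  intro frame
  induction frame with
  | nil => intro buf _ _ j hj; simp [pvLookup]
  | cons p t ih =>
    intro buf hnd hub j hj
    obtain ⟨k, r, g, b⟩ := p
    simp only [List.map_cons, List.nodup_cons] at hnd
    have hkt : k ∉ t.map (·.1) := hnd.1
    have hub' : ∀ q ∈ t, q.1 ≤ m := fun q hq => hub q (List.mem_cons_of_mem _ hq)
    simp only [List.foldl_cons]
    by_cases hk : k = (j : Int)
    · -- this pixel hits cell j; no later pixel can (nodup)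
      have hguard : 0 ≤ k ∧ k ≤ m := ⟨hk ▸ Int.natCast_nonneg j, hub _ (List.mem_cons_self) ⟩
      have hnone : pvLookup t (j : Int) = none := pvLookup_eq_none t _ (hk ▸ hkt)
      have := ih (buf.set k.toNat (pvPx r g b))
        hnd.2 hub' j (by simpa using hj)
      rw [if_pos hguard, this, hnone]
      simp [pvLookup, hk, hj]
    · -- pixel goes elsewhere (or is dropped); cell j untouched at this step
      have hbuf : ∀ b' : List Char, b' = (if 0 ≤ k ∧ k ≤ m then buf.set k.toNat (pvPx r g b) else buf) → b'[j]? = buf[j]? := by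
        intro b' hb'
        split at hb' <;> subst hb'
        · have : k.toNat ≠ j := by omega
          exact List.getElem?_set_ne this
        · rfl
      have hlen : (if 0 ≤ k ∧ k ≤ m then buf.set k.toNat (pvPx r g b) else buf).length = buf.length := by
        split <;> simp
      have := ih (if 0 ≤ k ∧ k ≤ m then buf.set k.toNat (pvPx r g b) else buf)
        hnd.2 hub' j (by rw [hlen]; exact hj)
      rw [this, hbuf _ rfl]
      simp [pvLookup, hk]

-- the common per-cell value
def pvCell (frame : List (Int × Int × Int × Int)) (i : Int) : Char :=
  match pvLookup frame i with
  | some (r, g, b) => pvPx r g b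
  | none => ' '

-- B's buffer, element by element
lemma pv_alt_chars (frame : List (Int × Int × Int × Int)) (m : Int)
    (hnd : (frame.map (·.1)).Nodup) (hub : ∀ p ∈ frame, p.1 ≤ m) :
    (frame.foldl
      (fun b p => if 0 ≤ p.1 ∧ p.1 ≤ m then b.set p.1.toNat (pvPx p.2.1 p.2.2.1 p.2.2.2) else b)
      (List.replicate (m + 1).toNat ' ')) =
    (PySem.List.pyRange 0 (m + 1) 1).map (fun i => pvCell frame i) := by
  have hlenL : (frame.foldl
      (fun b p => if 0 ≤ p.1 ∧ p.1 ≤ m then b.set p.1.toNat (pvPx p.2.1 p.2.2.1 p.2.2.2) else b)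
      (List.replicate (m + 1).toNat ' ')).length = (m + 1).toNat := by
    have : ∀ (fr : List (Int × Int × Int × Int)) (buf : List Char),
        (fr.foldl (fun b p => if 0 ≤ p.1 ∧ p.1 ≤ m then b.set p.1.toNat (pvPx p.2.1 p.2.2.1 p.2.2.2) else b) buf).length = buf.length := by
      intro fr
      induction fr with
      | nil => intro buf; rfl
      | cons q t ih =>
        intro buf
        simp only [List.foldl_cons]
        rw [ih]
        split <;> simp
    rw [this]; simp
  apply List.ext_getElem?
  intro j
  by_cases hj : j < (m + 1).toNat
  · rw [pv_scatter_get m frame _ hnd hub j (by rw [List.length_replicate]; exact hj)]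
    have hr : ((PySem.List.pyRange 0 (m + 1) 1).map (fun i => pvCell frame i))[j]? = some (pvCell frame (j : Int)) := by
      have hj' : j < (m + 1 - 0).toNat := by omega
      rw [List.getElem?_map, PySem.List.getElem?_pyRange_one, if_pos hj']
      simp
    rw [hr]
    unfold pvCell
    cases h : pvLookup frame (j : Int) with
    | none => simp [hj]
    | some v => obtain ⟨r, g, b⟩ := v; simp
  · rw [List.getElem?_eq_none, List.getElem?_eq_none]
    · rw [List.length_map, PySem.List.length_pyRange_one]; omega
    · rw [hlenL]; omega

-- join of singleton strings is String.ofList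
lemma pv_join_singletons (l : List Char) :
    PySem.Str.join "" (l.map (fun c => String.ofList [c])) = String.ofList l := by
  apply String.toList_inj.mp
  rw [PySem.Str.toList_join, List.map_map]
  have hcomp : (String.toList ∘ fun c => String.ofList [c]) = fun c => [c] := by
    funext c; simp
  rw [hcomp]
  have := PySem.Chars.join_nil_singletons l
  simpa using this

theorem ascii_preview_spec : Claim_equal_ascii_preview := by
  intro frame _ hpre
  unfold Spec_ascii_preview ascii_preview ascii_preview_alt
  dsimp only
  set m : Int := if frame = [] then 0 else (PySem.List.max? (frame.map (·.1)) (fun x => x)).getD 0 with hm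
  have hub : ∀ p ∈ frame, p.1 ≤ m := by
    intro p hp
    have hne : frame ≠ [] := by intro h; subst h; cases hp
    rw [hm, if_neg hne]
    cases hmax : PySem.List.max? (frame.map (·.1)) (fun x => x) with
    | none => exact absurd ((PySem.List.max?_eq_none_iff _ _).mp hmax) (by simpa using hne)
    | some v =>
      have := PySem.List.max?_isMax hmax p.1 (List.mem_map_of_mem hp)
      simpa using this
  rw [pvA_loop frame (PySem.List.pyRange 0 (m + 1) 1) []]
  rw [pv_alt_chars frame m hpre hub]
  rw [List.nil_append]
  have hmap : ((PySem.List.pyRange 0 (m + 1) 1).map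
    (fun i => match pvLookup frame i with
      | some (r, g, b) => if r > 200 then "●" else if r + g + b > 20 then "•" else "·"
      | none => " ")) =
    ((PySem.List.pyRange 0 (m + 1) 1).map (fun i => pvCell frame i)).map (fun c => String.ofList [c]) := by
    rw [List.map_map]
    apply List.map_congr_left
    intro i _
    unfold pvCell pvPx
    cases h : pvLookup frame i with
    | none => simp only [Function.comp_apply, h]
    | some v =>
      obtain ⟨r, g, b⟩ := v
      simp only [Function.comp_apply, h]
      split_ifs <;> rfl
  rw [hmap, pv_join_singletons]
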